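-- pv_equiv track=rewrite | github.com/jb-cho55/IVS_JETRACER | todo/scripts/lane_detector.py | _normalize_lane_colors
-- ===== SOURCE A (Python) =====
-- def _normalize_lane_colors(lane_colors):
--     supported = {"white", "yellow", "black"}
--
--     if isinstance(lane_colors, str):
--         colors = [c.strip().lower() for c in lane_colors.split(",") if c.strip()]
--     else:
--         colors = [str(c).strip().lower() for c in lane_colors if str(c).strip()]
--
--     if not colors:
--         colors = ["black"]
--
--     invalid = [c for c in colors if c not in supported]
--     if invalid:
--         raise ValueError(f"Unsupported lane_colors: {invalid}. Supported: {sorted(supported)}")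
--
--     # Remove duplicates but keep order.
--     return tuple(dict.fromkeys(colors))
-- ===== SOURCE B (Python) =====
-- def _normalize_lane_colors(lane_colors):
--     palette = ["white", "yellow", "black"]
--
--     if isinstance(lane_colors, str):
--         raw = lane_colors.split(",")
--     else:
--         raw = [str(c) for c in lane_colors]
--
--     colors = [t for t in (c.strip().lower() for c in raw) if t]
--     if not colors:
--         colors = ["black"]
--
--     bad = [c for c in colors if c not in palette]
--     if bad:
--         raise ValueError(f"Unsupported lane_colors: {bad}. Supported: {sorted(palette)}")
--
--     # Order the supported colors that occur by their first occurrence index.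
--     present = [c for c in palette if c in colors]
--     return tuple(sorted(present, key=colors.index))
-- ===== Notes on version B (the rewrite author's own statement) =====
-- stated objective: alternative
-- what changed: A dedups the normalized input with dict.fromkeys (order-preserving dedup over the input); B instead selects from the fixed 3-color palette the colors that occur and orders them with sorted(present, key=colors.index), i.e. by first-occurrence index, so no dedup pass over the input exists.
import Mathlib
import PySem

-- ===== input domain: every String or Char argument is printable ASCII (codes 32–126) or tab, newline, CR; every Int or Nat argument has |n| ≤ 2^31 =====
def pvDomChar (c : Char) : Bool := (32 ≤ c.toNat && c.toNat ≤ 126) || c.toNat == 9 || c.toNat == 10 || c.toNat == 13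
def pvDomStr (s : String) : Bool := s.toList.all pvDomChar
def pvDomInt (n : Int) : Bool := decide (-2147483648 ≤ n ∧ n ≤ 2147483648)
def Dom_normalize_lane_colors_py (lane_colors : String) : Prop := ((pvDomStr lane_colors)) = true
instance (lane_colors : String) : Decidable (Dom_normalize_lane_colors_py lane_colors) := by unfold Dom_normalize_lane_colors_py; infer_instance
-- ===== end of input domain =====

-- B replaces A's order-preserving dedup of the input (dict.fromkeys) by a selection over the fixed
-- 3-color palette, ordered by first-occurrence index (sorted(present, key=colors.index));
-- objective: alternative — same value on every input where A returns (A's ValueError inputs are outside Pre_).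

-- lane_colors.split(",")  — sep "," is non-empty, so Python's split never raises (getD [] unreachable)
def pvRawTokens (s : String) : List String := (PySem.Str.split? s ",").getD []

-- ===== PORT A =====
def normalize_lane_colors_py (lane_colors : String) : List String :=
  -- colors = [c.strip().lower() for c in lane_colors.split(",") if c.strip()]
  let colors := ((pvRawTokens lane_colors).filter
      (fun c => PySem.Str.strip c ≠ "")).map
      (fun c => PySem.Str.lower (PySem.Str.strip c))
  -- if not colors: colors = ["black"]
  let colors := if colors = [] then ["black"] else colors
  -- invalid = [c for c in colors if c not in supported]; if invalid: raise ValueError(...) — excluded by Pre_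
  -- return tuple(dict.fromkeys(colors))
  PySem.List.dedup colors

-- ===== PORT B =====
def normalize_lane_colors_py_alt (lane_colors : String) : List String :=
  let palette : List String := ["white", "yellow", "black"]
  -- colors = [t for t in (c.strip().lower() for c in raw) if t]
  let colors := ((pvRawTokens lane_colors).map
      (fun c => PySem.Str.lower (PySem.Str.strip c))).filter (fun t => t ≠ "")
  -- if not colors: colors = ["black"]
  let colors := if colors = [] then ["black"] else colors
  -- bad = [c for c in colors if c not in palette]; if bad: raise ValueError(...) — excluded by Pre_
  -- present = [c for c in palette if c in colors]
  let present := palette.filter (fun c => decide (c ∈ colors))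
  -- return tuple(sorted(present, key=colors.index)); every c in present is in colors,
  -- so colors.index never raises — the getD 0 default is unreachable
  PySem.List.sorted present (fun c => (PySem.List.index? colors c).getD 0) false

-- ===== PRECONDITION & SPEC =====
-- Pre_ excludes exactly the inputs with an unsupported (non-empty, stripped, lowered) token,
-- on which Python A raises ValueError.
def Pre_normalize_lane_colors_py (lane_colors : String) : Prop :=
  ∀ c ∈ pvRawTokens lane_colors, PySem.Str.strip c ≠ "" →
    PySem.Str.lower (PySem.Str.strip c) ∈ (["white", "yellow", "black"] : List String)
instance (lane_colors : String) : Decidable (Pre_normalize_lane_colors_py lane_colors) := by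
  unfold Pre_normalize_lane_colors_py; infer_instance

def pvWitness_normalize_lane_colors_py : String := " White, yellow ,,black, white"

def Spec_normalize_lane_colors_py (lane_colors : String) (out : List String) : Prop := out = normalize_lane_colors_py_alt lane_colors
instance (lane_colors : String) (out : List String) : Decidable (Spec_normalize_lane_colors_py lane_colors out) := by unfold Spec_normalize_lane_colors_py; infer_instance

-- ===== CLAIM (what is proved, stated in full; the proofs are below) =====
def Claim_equal_normalize_lane_colors_py : Prop := ∀ (lane_colors : String), Dom_normalize_lane_colors_py lane_colors → Pre_normalize_lane_colors_py lane_colors → Spec_normalize_lane_colors_py lane_colors (normalize_lane_colors_py lane_colors)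

-- ===== LEMMAS AND PROOFS =====

-- Python: `if t` on t = c.strip().lower() — lower is empty iff its input is.
theorem pv_lower_eq_empty_iff (s : String) : PySem.Str.lower s = "" ↔ s = "" := by
  constructor
  · intro h
    have h2 : (PySem.Str.lower s).toList = [] := by rw [h]; rfl
    rw [PySem.Str.toList_lower] at h2
    have h3 : s.toList = [] := by simpa [PySem.Chars.lower] using h2
    simpa using congrArg String.ofList h3
  · intro h; subst h; rfl

-- B's filter-after-map comprehension equals A's filter-then-map comprehension.
theorem pv_colors_eq (raw : List String) :
    ((raw.map (fun c => PySem.Str.lower (PySem.Str.strip c))).filter (fun t => t ≠ "")) =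
    ((raw.filter (fun c => PySem.Str.strip c ≠ "")).map
      (fun c => PySem.Str.lower (PySem.Str.strip c))) := by
  induction raw with
  | nil => rfl
  | cons c cs ih =>
    by_cases hs : PySem.Str.strip c = ""
    · have h0 : PySem.Str.lower "" = "" := rfl
      simp only [List.map_cons, List.filter_cons, hs, h0, ne_eq, not_true_eq_false,
        decide_false, Bool.false_eq_true, if_false, ih]
    · have hl : PySem.Str.lower (PySem.Str.strip c) ≠ "" :=
        fun h => hs ((pv_lower_eq_empty_iff _).mp h)
      simp only [List.map_cons, List.filter_cons, hs, hl, ne_eq, not_false_eq_true,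
        decide_true, if_true, List.map_cons, ih]

-- appending to a running keep-first dedup only adds the elements not already collected
theorem pv_foldl_add_acc {α : Type} [DecidableEq α] (xs : List α) (acc : List α) :
    xs.foldl PySem.Set.add acc =
      acc ++ (xs.foldl PySem.Set.add []).filter (fun y => decide (y ∉ acc)) := by
  induction xs generalizing acc with
  | nil => simp
  | cons x xs ih =>
    simp only [List.foldl_cons]
    rw [ih (PySem.Set.add acc x), ih (PySem.Set.add [] x)]
    have hadd : PySem.Set.add ([] : List α) x = [x] := rfl
    rw [hadd]
    by_cases hx : x ∈ acc
    · have h1 : PySem.Set.add acc x = acc := by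
        simp [PySem.Set.add, PySem.Set.contains, hx]
      rw [h1]
      have key : List.filter (fun y => decide (y ∉ acc))
          ([x] ++ (xs.foldl PySem.Set.add []).filter (fun y => decide (y ∉ ([x] : List α)))) =
          List.filter (fun y => decide (y ∉ acc)) (xs.foldl PySem.Set.add []) := by
        rw [List.filter_append, List.filter_filter]
        have e1 : List.filter (fun y => decide (y ∉ acc)) [x] = [] := by simp [hx]
        rw [e1, List.nil_append]
        apply List.filter_congr
        intro y _
        by_cases h2 : y ∈ acc
        · simp [h2]
        · have h3 : y ≠ x := fun h => h2 (h ▸ hx)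
          simp [h2, h3]
      rw [key]
    · have h1 : PySem.Set.add acc x = acc ++ [x] := by
        simp [PySem.Set.add, PySem.Set.contains, hx]
      rw [h1]
      have e1 : List.filter (fun y => decide (y ∉ acc)) [x] = [x] := by simp [hx]
      rw [List.filter_append, List.filter_filter, e1, List.append_assoc]
      have key : List.filter (fun y => decide (y ∉ acc ++ [x])) (xs.foldl PySem.Set.add []) =
          List.filter (fun y => decide (y ∉ ([x] : List α)) && decide (y ∉ acc))
            (xs.foldl PySem.Set.add []) := by
        apply List.filter_congr
        intro y _
        by_cases h2 : y ∈ acc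
        · simp [h2]
        · by_cases h3 : y = x <;> simp [h2, h3]
      rw [key]
      simp [Bool.and_comm]

-- keep-first dedup, cons step: first occurrences of x :: xs are x, then those of xs other than x
theorem pv_dedup_cons {α : Type} [DecidableEq α] (x : α) (xs : List α) :
    PySem.List.dedup (x :: xs) = x :: (PySem.List.dedup xs).filter (fun y => decide (y ≠ x)) := by
  have h1 : PySem.List.dedup (x :: xs) = (x :: xs).foldl PySem.Set.add [] := by
    rw [PySem.List.dedup_eq_ofList, PySem.Set.ofList_eq_foldl]
  have h2 : PySem.List.dedup xs = xs.foldl PySem.Set.add [] := by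
    rw [PySem.List.dedup_eq_ofList, PySem.Set.ofList_eq_foldl]
  rw [h1, h2, List.foldl_cons]
  have hadd : PySem.Set.add ([] : List α) x = [x] := rfl
  rw [hadd, pv_foldl_add_acc xs [x]]
  simp

-- dedup lists its elements in strictly increasing order of first-occurrence index
theorem pv_dedup_pairwise {α : Type} [DecidableEq α] (xs : List α) :
    (PySem.List.dedup xs).Pairwise
      (fun a b => ((PySem.List.index? xs a).getD 0 : Nat) < (PySem.List.index? xs b).getD 0) := by
  induction xs with
  | nil => exact List.Pairwise.nil
  | cons x xs ih =>
    rw [pv_dedup_cons]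
    constructor
    · intro b hb
      have hbx : b ≠ x := by simpa using (List.of_mem_filter hb)
      have hbmem : b ∈ xs := (PySem.List.mem_dedup _ _).mp (List.mem_of_mem_filter hb)
      rw [PySem.List.index?_cons_self,
          PySem.List.index?_cons_of_ne xs (show x ≠ b from fun h => hbx h.symm)]
      cases hk : PySem.List.index? xs b with
      | none => exact absurd ((PySem.List.index?_eq_none_iff _ _).mp hk) (by simpa using hbmem)
      | some k => simp
    · have hf := List.Pairwise.filter (fun y => decide (y ≠ x)) ih
      refine hf.imp_of_mem ?_
      intro a b ha hb hab
      have hax : a ≠ x := by simpa using (List.of_mem_filter ha)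
      have hbx : b ≠ x := by simpa using (List.of_mem_filter hb)
      have hamem : a ∈ xs := (PySem.List.mem_dedup _ _).mp (List.mem_of_mem_filter ha)
      have hbmem : b ∈ xs := (PySem.List.mem_dedup _ _).mp (List.mem_of_mem_filter hb)
      rw [PySem.List.index?_cons_of_ne xs (show x ≠ a from fun h => hax h.symm),
          PySem.List.index?_cons_of_ne xs (show x ≠ b from fun h => hbx h.symm)]
      cases hka : PySem.List.index? xs a with
      | none => exact absurd ((PySem.List.index?_eq_none_iff _ _).mp hka) (by simpa using hamem)
      | some ka =>
        cases hkb : PySem.List.index? xs b with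
        | none => exact absurd ((PySem.List.index?_eq_none_iff _ _).mp hkb) (by simpa using hbmem)
        | some kb =>
          rw [hka, hkb] at hab
          simp at hab ⊢
          omega

-- dedup of a list drawn from the palette is a rearrangement of the present palette entries
theorem pv_dedup_perm_present (colors palette : List String)
    (hpal : palette.Nodup) (hsub : ∀ y ∈ colors, y ∈ palette) :
    (PySem.List.dedup colors).Perm (palette.filter (fun c => decide (c ∈ colors))) := by
  rw [List.perm_ext_iff_of_nodup (PySem.List.nodup_dedup _) (hpal.filter _)]
  intro a
  rw [PySem.List.mem_dedup, List.mem_filter]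
  constructor
  · intro ha; exact ⟨hsub a ha, by simpa using ha⟩
  · intro ⟨_, ha⟩; simpa using ha

-- ===== VERDICT (by name: the statement is the Claim_ definition above) =====
theorem normalize_lane_colors_py_spec : Claim_equal_normalize_lane_colors_py := by
  intro s _ hpre
  unfold Spec_normalize_lane_colors_py normalize_lane_colors_py normalize_lane_colors_py_alt
  simp only [pv_colors_eq]
  set colors0 := ((pvRawTokens s).filter (fun c => PySem.Str.strip c ≠ "")).map
      (fun c => PySem.Str.lower (PySem.Str.strip c)) with hc
  set colors := if colors0 = [] then ["black"] else colors0 with hcol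
  have hsub : ∀ y ∈ colors, y ∈ (["white", "yellow", "black"] : List String) := by
    intro y hy
    rw [hcol] at hy
    by_cases h0 : colors0 = []
    · rw [if_pos h0] at hy
      simp at hy
      simp [hy]
    · rw [if_neg h0, hc] at hy
      obtain ⟨c, hcmem, rfl⟩ := List.mem_map.mp hy
      exact hpre c (List.mem_of_mem_filter hcmem) (by simpa using List.of_mem_filter hcmem)
  exact (PySem.List.sorted_eq_of_perm_of_pairwise_lt _ _ _
    (pv_dedup_perm_present colors _ (by decide) hsub) (pv_dedup_pairwise colors)).symm
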